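-- pv_equiv track=rewrite | github.com/yuhaitao1994/LIC2019_Information_Extraction | P_classification/postprocess.py | is_spo_correct
-- ===== SOURCE A (Python) =====
-- def is_spo_correct(spo, golden_spo_set, alias_dict, loc_dict):
--     """if the spo is correct"""
--     if spo in golden_spo_set:
--         return True
--     (s, p, o) = spo
--     # alias dictionary
--     s_alias_set = alias_dict.get(s, set())
--     s_alias_set.add(s)
--     o_alias_set = alias_dict.get(o, set())
--     o_alias_set.add(o)
--     for s_a in s_alias_set:
--         for o_a in o_alias_set:
--             if (s_a, p, o_a) in golden_spo_set:
--                 return True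
--     for golden_spo in golden_spo_set:
--         (golden_s, golden_p, golden_o) = golden_spo
--         golden_o_set = loc_dict.get(golden_o, set())
--         for g_o in golden_o_set:
--             if s == golden_s and p == golden_p and o == g_o:
--                 return True
--     return False
-- ===== SOURCE B (Python) =====
-- def is_spo_correct(spo, golden_spo_set, alias_dict, loc_dict):
--     """if the spo is correct"""
--     (s, p, o) = spo
--     s_aliases = alias_dict.get(s, set()) | {s}
--     o_aliases = alias_dict.get(o, set()) | {o}
--     # single pass over the golden set: each golden triple either matches up to
--     # aliases (predicate-equal, subject/object in the alias sets) or matches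
--     # with the object resolved through the golden object's location set
--     for (gs, gp, go) in golden_spo_set:
--         if gp == p and ((gs in s_aliases and go in o_aliases)
--                         or (gs == s and o in loc_dict.get(go, set()))):
--             return True
--     return False
-- ===== Notes on version B (the rewrite author's own statement) =====
-- stated objective: alternative
-- what changed: Replaces A's three staged scans (exact membership test, alias cross-product double loop over the golden set, and golden-set scan with an inner location-element loop) by ONE pass over the golden set with a combined per-triple test using alias-set and location-set membership; the exact-match case is subsumed because s and o always belong to their own alias sets.
import Mathlib
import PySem

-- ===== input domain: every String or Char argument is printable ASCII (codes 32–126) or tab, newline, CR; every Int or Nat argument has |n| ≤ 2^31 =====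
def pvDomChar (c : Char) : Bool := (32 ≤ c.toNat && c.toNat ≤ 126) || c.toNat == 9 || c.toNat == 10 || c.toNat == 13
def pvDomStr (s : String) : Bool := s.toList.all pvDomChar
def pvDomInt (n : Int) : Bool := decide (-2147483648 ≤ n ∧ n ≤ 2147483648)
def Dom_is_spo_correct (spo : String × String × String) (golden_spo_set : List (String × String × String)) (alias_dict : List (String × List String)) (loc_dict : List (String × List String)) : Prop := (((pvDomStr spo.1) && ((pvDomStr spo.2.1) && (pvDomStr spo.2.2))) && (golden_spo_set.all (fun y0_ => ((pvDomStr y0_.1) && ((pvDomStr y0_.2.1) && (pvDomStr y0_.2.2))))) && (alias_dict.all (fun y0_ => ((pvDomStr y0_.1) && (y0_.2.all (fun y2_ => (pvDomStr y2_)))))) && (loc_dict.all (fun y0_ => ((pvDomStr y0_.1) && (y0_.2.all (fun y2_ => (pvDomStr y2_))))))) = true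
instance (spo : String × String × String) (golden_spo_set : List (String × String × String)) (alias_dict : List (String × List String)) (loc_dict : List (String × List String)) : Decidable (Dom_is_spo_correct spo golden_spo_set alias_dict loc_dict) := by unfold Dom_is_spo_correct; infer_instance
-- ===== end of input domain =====

-- B fuses A's three staged scans into one recursive pass over the golden set with a combined
-- per-triple test (alternative decomposition, same result). A mutates the sets stored in
-- alias_dict in place (adds s / o to them); B does not — the equivalence proved here is about
-- the RETURN value only.

-- ===== PORT A =====
def is_spo_correct (spo : String × String × String) (golden_spo_set : List (String × String × String)) (alias_dict : List (String × List String)) (loc_dict : List (String × List String)) : Bool :=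
  if golden_spo_set.contains spo then true
  else
    let s := spo.1; let p := spo.2.1; let o := spo.2.2
    -- s_alias_set = alias_dict.get(s, set()); s_alias_set.add(s)  (membership-faithful; set values)
    let s_alias_set := PySem.Set.add (PySem.Dict.getD ⟨alias_dict⟩ s PySem.Set.empty) s
    let o_alias_set := PySem.Set.add (PySem.Dict.getD ⟨alias_dict⟩ o PySem.Set.empty) o
    if s_alias_set.any (fun s_a => o_alias_set.any (fun o_a => golden_spo_set.contains (s_a, p, o_a))) then true
    else
      golden_spo_set.any (fun golden_spo =>
        (PySem.Dict.getD ⟨loc_dict⟩ golden_spo.2.2 PySem.Set.empty).any (fun g_o =>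
          s == golden_spo.1 && p == golden_spo.2.1 && o == g_o))

-- ===== PORT B =====
-- the single pass of Source B: structural recursion over the golden list, stopping at the first hit
def pvScanB (s p o : String) (sA oA : PySem.Set String) (loc_dict : List (String × List String)) : List (String × String × String) → Bool
  | [] => false
  | (gs, gp, go) :: rest =>
    if gp == p && ((PySem.Set.contains sA gs && PySem.Set.contains oA go)
                   || (gs == s && (PySem.Dict.getD ⟨loc_dict⟩ go PySem.Set.empty).contains o))
    then true
    else pvScanB s p o sA oA loc_dict rest

def is_spo_correct_alt (spo : String × String × String) (golden_spo_set : List (String × String × String)) (alias_dict : List (String × List String)) (loc_dict : List (String × List String)) : Bool :=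
  let s := spo.1; let p := spo.2.1; let o := spo.2.2
  -- s_aliases = alias_dict.get(s, set()) | {s}
  let s_aliases := PySem.Set.union (PySem.Dict.getD ⟨alias_dict⟩ s PySem.Set.empty) [s]
  let o_aliases := PySem.Set.union (PySem.Dict.getD ⟨alias_dict⟩ o PySem.Set.empty) [o]
  pvScanB s p o s_aliases o_aliases loc_dict golden_spo_set

-- ===== PRECONDITION & SPEC =====
def Spec_is_spo_correct (spo : String × String × String) (golden_spo_set : List (String × String × String)) (alias_dict : List (String × List String)) (loc_dict : List (String × List String)) (out : Bool) : Prop := out = is_spo_correct_alt spo golden_spo_set alias_dict loc_dict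
instance (spo : String × String × String) (golden_spo_set : List (String × String × String)) (alias_dict : List (String × List String)) (loc_dict : List (String × List String)) (out : Bool) : Decidable (Spec_is_spo_correct spo golden_spo_set alias_dict loc_dict out) := by unfold Spec_is_spo_correct; infer_instance

-- ===== CLAIM (what is proved, stated in full; the proofs are below) =====
def Claim_equal_is_spo_correct : Prop := ∀ (spo : String × String × String) (golden_spo_set : List (String × String × String)) (alias_dict : List (String × List String)) (loc_dict : List (String × List String)), Dom_is_spo_correct spo golden_spo_set alias_dict loc_dict → Spec_is_spo_correct spo golden_spo_set alias_dict loc_dict (is_spo_correct spo golden_spo_set alias_dict loc_dict)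

-- ===== LEMMAS AND PROOFS =====

-- B's early-exit recursion computes an 'any' over the golden list
theorem pvScanB_eq_any (s p o : String) (sA oA : PySem.Set String) (ld : List (String × List String)) (G : List (String × String × String)) :
    pvScanB s p o sA oA ld G
      = G.any (fun g => g.2.1 == p && ((PySem.Set.contains sA g.1 && PySem.Set.contains oA g.2.2)
                   || (g.1 == s && (PySem.Dict.getD ⟨ld⟩ g.2.2 PySem.Set.empty).contains o))) := by
  induction G with
  | nil => rfl
  | cons g rest ih =>
    obtain ⟨gs, gp, go⟩ := g
    rw [List.any_cons, ← ih]
    simp only [pvScanB]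
    cases h : (gp == p && ((PySem.Set.contains sA gs && PySem.Set.contains oA go)
                   || (gs == s && (PySem.Dict.getD ⟨ld⟩ go PySem.Set.empty).contains o)))
    · simp
    · simp

theorem is_spo_correct_spec : Claim_equal_is_spo_correct := by
  intro ⟨s, p, o⟩ G ad ld _
  unfold Spec_is_spo_correct is_spo_correct is_spo_correct_alt
  dsimp only
  rw [pvScanB_eq_any, Bool.eq_iff_iff]
  simp only [Bool.if_true_left, Bool.or_eq_true, decide_eq_true_eq, List.any_eq_true,
    Bool.and_eq_true, beq_iff_eq, PySem.Set.contains_iff, PySem.Set.mem_union,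
    PySem.Set.mem_add, List.mem_singleton, List.contains_iff_mem]
  constructor
  · -- A returns true → B's single pass hits
    rintro (hmem | ⟨a, ha, b, hb, hg⟩ | ⟨g, hg, x, hx, ⟨h1, h2⟩, h3⟩)
    · -- exact member: its own triple passes the combined test (s, o are in their alias sets)
      exact ⟨(s, p, o), hmem, rfl, Or.inl ⟨Or.inr rfl, Or.inr rfl⟩⟩
    · exact ⟨(a, p, b), hg, rfl, Or.inl ⟨ha, hb⟩⟩
    · exact ⟨g, hg, h2.symm, Or.inr ⟨h1.symm, by rw [h3]; exact hx⟩⟩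
  · -- B's single pass hits → A returns true
    rintro ⟨⟨gs, gp, go⟩, hg, hp, (⟨hs, ho⟩ | ⟨hs, ho⟩)⟩
    · exact Or.inr (Or.inl ⟨gs, hs, go, ho, hp ▸ hg⟩)
    · exact Or.inr (Or.inr ⟨(gs, gp, go), hg, o, ho, ⟨hs.symm, hp.symm⟩, rfl⟩)
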